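-- pv_equiv track=rewrite | github.com/liamgak/graduating_proj | compute_group.py | merge_two_group
-- ===== SOURCE A (Python) =====
-- def merge_two_group(first_group_list, second_group_list):
--     merged_group_list=[]
--     first_group_separated_index=0
--     second_group_separated_index=0
--
--     for i in first_group_list:
--         if len(i)==1:
--             break
--         first_group_separated_index = first_group_separated_index+1
--
--     for i in second_group_list:
--         if len(i)==1:
--             break
--         second_group_separated_index = second_group_separated_index+1
--
--     #merge
--     merged_group_list = first_group_list[:first_group_separated_index] + second_group_list[:second_group_separated_index]
--     merged_group_list = merged_group_list + first_group_list[first_group_separated_index:] + second_group_list[second_group_separated_index:]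
--
--     return merged_group_list
-- ===== SOURCE B (Python) =====
-- def merge_two_group(first_group_list, second_group_list):
--     fh, ft = _split_at_singleton(first_group_list)
--     sh, st = _split_at_singleton(second_group_list)
--     return fh + sh + ft + st
--
-- def _split_at_singleton(lst):
--     if not lst or len(lst[0]) == 1:
--         return [], lst
--     head, tail = _split_at_singleton(lst[1:])
--     return [lst[0]] + head, tail
-- ===== Notes on version B (the rewrite author's own statement) =====
-- stated objective: simpler
-- what changed: Replaces the index-counting loops plus four slices with a single recursive split-at-first-singleton helper that returns (head, tail) pairs directly, with no index counters and no slicing.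
import Mathlib
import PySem

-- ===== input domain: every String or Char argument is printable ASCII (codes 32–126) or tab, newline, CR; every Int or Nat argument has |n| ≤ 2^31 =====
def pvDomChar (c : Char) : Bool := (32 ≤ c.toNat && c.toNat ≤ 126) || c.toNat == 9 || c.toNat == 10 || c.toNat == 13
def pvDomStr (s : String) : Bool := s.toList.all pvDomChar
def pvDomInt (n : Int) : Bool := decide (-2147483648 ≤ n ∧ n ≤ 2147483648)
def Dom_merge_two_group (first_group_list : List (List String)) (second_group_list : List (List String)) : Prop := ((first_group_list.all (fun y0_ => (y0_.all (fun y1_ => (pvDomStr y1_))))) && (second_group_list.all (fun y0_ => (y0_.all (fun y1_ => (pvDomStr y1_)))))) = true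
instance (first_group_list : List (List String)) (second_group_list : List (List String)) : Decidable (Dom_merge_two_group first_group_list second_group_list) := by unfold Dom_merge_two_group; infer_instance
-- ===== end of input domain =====

-- B replaces A's index-counting loops and four slices with one recursive split-at-first-singleton helper (simpler decomposition, same cost).

-- ===== PORT A =====
-- the 'for i in lst: if len(i)==1: break; idx += 1' loop of A, as structural recursion over the list
def sepIdx_A : List (List String) → Nat
  | [] => 0
  | i :: rest => if i.length == 1 then 0 else sepIdx_A rest + 1

def merge_two_group (first_group_list : List (List String)) (second_group_list : List (List String)) : List (List String) :=
  let first_group_separated_index := sepIdx_A first_group_list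
  let second_group_separated_index := sepIdx_A second_group_list
  let merged_group_list :=
    PySem.List.slice first_group_list none (some (first_group_separated_index : Int)) ++
    PySem.List.slice second_group_list none (some (second_group_separated_index : Int))
  merged_group_list ++
    PySem.List.slice first_group_list (some (first_group_separated_index : Int)) none ++
    PySem.List.slice second_group_list (some (second_group_separated_index : Int)) none

-- ===== PORT B =====
-- _split_at_singleton from Source B
def splitAtSingleton : List (List String) → List (List String) × List (List String)
  | [] => ([], [])
  | g :: rest =>
    if g.length == 1 then ([], g :: rest)
    else
      let (head, tail) := splitAtSingleton rest
      (g :: head, tail)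

def merge_two_group_alt (first_group_list : List (List String)) (second_group_list : List (List String)) : List (List String) :=
  let (fh, ft) := splitAtSingleton first_group_list
  let (sh, st) := splitAtSingleton second_group_list
  fh ++ sh ++ ft ++ st

-- ===== PRECONDITION & SPEC =====
def Spec_merge_two_group (first_group_list : List (List String)) (second_group_list : List (List String)) (out : List (List String)) : Prop := out = merge_two_group_alt first_group_list second_group_list
instance (first_group_list : List (List String)) (second_group_list : List (List String)) (out : List (List String)) : Decidable (Spec_merge_two_group first_group_list second_group_list out) := by unfold Spec_merge_two_group; infer_instance

-- ===== CLAIM (what is proved, stated in full; the proofs are below) =====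
def Claim_equal_merge_two_group : Prop := ∀ (first_group_list : List (List String)) (second_group_list : List (List String)), Dom_merge_two_group first_group_list second_group_list → Spec_merge_two_group first_group_list second_group_list (merge_two_group first_group_list second_group_list)

-- ===== LEMMAS AND PROOFS =====
theorem take_sepIdx (l : List (List String)) : l.take (sepIdx_A l) = (splitAtSingleton l).1 := by
  induction l with
  | nil => simp [sepIdx_A, splitAtSingleton]
  | cons g rest ih =>
    simp only [sepIdx_A, splitAtSingleton]
    split_ifs with h
    · simp
    · simp [List.take_succ_cons, ih]

theorem drop_sepIdx (l : List (List String)) : l.drop (sepIdx_A l) = (splitAtSingleton l).2 := by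
  induction l with
  | nil => simp [sepIdx_A, splitAtSingleton]
  | cons g rest ih =>
    simp only [sepIdx_A, splitAtSingleton]
    split_ifs with h
    · simp
    · simp [List.drop_succ_cons, ih]

-- ===== VERDICT (by name: the statement is the Claim_ definition above) =====
theorem merge_two_group_spec : Claim_equal_merge_two_group := by
  intro f s _
  unfold Spec_merge_two_group merge_two_group merge_two_group_alt
  simp only [PySem.List.slice_to_natCast, PySem.List.slice_from_natCast,
    take_sepIdx, drop_sepIdx]
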